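-- pv_equiv track=rewrite | github.com/alifahsanul/Codility | BinaryGap.py | solution
-- ===== SOURCE A (Python) =====
-- def solution(N):
--     # write your code in Python 3.6
--
--     max_gap=0
--     current_gap=0
--
--     if not(isinstance(N,int)) or N<0 or N>2147483647:
--         raise ValueError ("Must be positive integer less or equal than 2147483647")
--         return -1
--
--     b="{0:b}".format(N)
--
--     if b[0]!="1":
--         return -1
--
--     for i in range(len(b)):
--         if b[i]=="0":
--             current_gap=current_gap+1
--         else:
--             if current_gap>max_gap:
--                 max_gap=current_gap
--             current_gap=0
--     return max_gap
-- ===== SOURCE B (Python) =====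
-- def solution(N):
--     if not isinstance(N, int) or N < 0 or N > 2147483647:
--         raise ValueError("Must be positive integer less or equal than 2147483647")
--     b = "{0:b}".format(N)
--     if b[0] != "1":
--         return -1
--     # zero-run segments between ones; drop trailing segment (not bounded by a 1)
--     return max((len(s) for s in b.split("1")[:-1]), default=0)
-- ===== Notes on version B (the rewrite author's own statement) =====
-- stated objective: idiomatic
-- what changed: Replaces the stateful char-by-char scan maintaining current_gap/max_gap by splitting the binary string on '1', dropping the trailing segment, and taking the max segment length.
import Mathlib
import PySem

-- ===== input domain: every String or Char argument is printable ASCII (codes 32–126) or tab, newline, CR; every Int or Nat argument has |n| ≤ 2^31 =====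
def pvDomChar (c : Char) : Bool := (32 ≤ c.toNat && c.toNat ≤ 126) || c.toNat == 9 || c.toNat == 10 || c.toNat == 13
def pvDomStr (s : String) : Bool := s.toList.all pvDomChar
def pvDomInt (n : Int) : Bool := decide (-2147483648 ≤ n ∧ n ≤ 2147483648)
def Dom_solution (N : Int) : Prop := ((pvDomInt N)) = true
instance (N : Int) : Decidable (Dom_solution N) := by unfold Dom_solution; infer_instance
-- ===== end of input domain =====

-- B replaces A's stateful current_gap/max_gap scan by split-on-'1' / drop trailing segment / max of lengths (idiomatic decomposition, same cost).

-- ===== PORT A =====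
-- "{0:b}".format(n) for n ≥ 1, as a list of '0'/'1' characters (exact for nonnegative ints)
def natBin : Nat → List Char
  | 0 => []
  | n + 1 => natBin ((n + 1) / 2) ++ [if (n + 1) % 2 = 1 then '1' else '0']
decreasing_by exact Nat.div_lt_self (Nat.succ_pos n) (by omega)

-- the full binary string of a nonnegative N ("{0:b}".format(0) = "0")
def binStr (N : Int) : List Char := if N = 0 then ['0'] else natBin N.toNat

def solution (N : Int) : Int :=
  if N < 0 ∨ N > 2147483647 then -1  -- Python raises ValueError here; excluded by Pre_solution
  else
    let b := binStr N
    if b.headD ' ' ≠ '1' then -1     -- b[0] != "1"; b is never empty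
    else
      -- for i in range(len(b)): state (max_gap, current_gap)
      let p := b.foldl
        (fun (s : Nat × Nat) c =>
          if c = '0' then (s.1, s.2 + 1)
          else if s.2 > s.1 then (s.2, 0) else (s.1, 0)) (0, 0)
      (p.1 : Int)

-- ===== PORT B =====
-- Python str.split with the single-character separator "1" (exact port)
def pysplit : List Char → List (List Char)
  | [] => [[]]
  | c :: t =>
      if c = '1' then [] :: pysplit t
      else
        match pysplit t with
        | [] => [[c]]          -- unreachable: pysplit never returns []
        | s :: r => (c :: s) :: r

def solution_alt (N : Int) : Int :=
  if N < 0 ∨ N > 2147483647 then -1  -- ValueError in Source B; excluded by Pre_solution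
  else
    let b := binStr N
    if b.headD ' ' ≠ '1' then -1
    else
      -- max((len(s) for s in b.split("1")[:-1]), default=0): max over Nat lengths, exact
      ((((pysplit b).dropLast.map List.length).foldl Nat.max 0 : Nat) : Int)

-- ===== PRECONDITION & SPEC =====
-- A raises ValueError exactly when N < 0 or N > 2147483647; those inputs are excluded.
def Pre_solution (N : Int) : Prop := 0 ≤ N ∧ N ≤ 2147483647
instance (N : Int) : Decidable (Pre_solution N) := by unfold Pre_solution; infer_instance
def pvWitness_solution : Int := (1041)

def Spec_solution (N : Int) (out : Int) : Prop := out = solution_alt N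
instance (N : Int) (out : Int) : Decidable (Spec_solution N out) := by unfold Spec_solution; infer_instance

-- ===== CLAIM (what is proved, stated in full; the proofs are below) =====
def Claim_equal_solution : Prop := ∀ (N : Int), Dom_solution N → Pre_solution N → Spec_solution N (solution N)

-- ===== LEMMAS AND PROOFS =====

-- A's loop body
def stepA (s : Nat × Nat) (c : Char) : Nat × Nat :=
  if c = '0' then (s.1, s.2 + 1)
  else if s.2 > s.1 then (s.2, 0) else (s.1, 0)

-- gap value of the suffix, given the current run length
def bval : List Char → Nat → Nat
  | [], _ => 0
  | c :: t, k => if c = '0' then bval t (k + 1) else Nat.max k (bval t 0)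

theorem pysplit_one (t : List Char) : pysplit ('1' :: t) = [] :: pysplit t := by
  simp [pysplit]

theorem pysplit_zero (t : List Char) (s : List Char) (rest : List (List Char))
    (h : pysplit t = s :: rest) : pysplit ('0' :: t) = ('0' :: s) :: rest := by
  simp [pysplit, h]

theorem bval_zero (t : List Char) (k : Nat) : bval ('0' :: t) k = bval t (k + 1) := by
  simp [bval]

theorem bval_one (t : List Char) (k : Nat) : bval ('1' :: t) k = Nat.max k (bval t 0) := by
  simp [bval]

theorem foldlA_eq_bval (cs : List Char) : ∀ m c : Nat,
    (cs.foldl stepA (m, c)).1 = Nat.max m (bval cs c) := by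
  induction cs with
  | nil => intro m c; simp [bval]
  | cons a t ih =>
      intro m c
      by_cases h : a = '0'
      · simp [stepA, bval, h, ih]
      · have hmax : stepA (m, c) a = (Nat.max m c, 0) := by
          simp only [stepA, if_neg h]
          split_ifs with hc <;> simp [Nat.max_def] <;> omega
        simp [bval, h, hmax, ih, Nat.max_assoc]

theorem pysplit_ne_nil (cs : List Char) : pysplit cs ≠ [] := by
  cases cs with
  | nil => simp [pysplit]
  | cons c t =>
      by_cases h : c = '1'
      · simp [pysplit, h]
      · simp only [pysplit, if_neg h]
        cases pysplit t <;> simp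

def fmax (l : List Nat) : Nat := l.foldl Nat.max 0

theorem foldl_max_init (l : List Nat) : ∀ a : Nat, l.foldl Nat.max a = Nat.max a (fmax l) := by
  induction l with
  | nil => intro a; simp [fmax]
  | cons x t ih =>
      intro a
      simp only [List.foldl, fmax] at *
      rw [ih, ih (Nat.max 0 x)]
      simp [Nat.max_assoc]

theorem fmax_cons (a : Nat) (l : List Nat) : fmax (a :: l) = Nat.max a (fmax l) := by
  simp only [fmax, List.foldl]
  rw [foldl_max_init]
  simp [fmax]

def only01 (cs : List Char) : Prop := ∀ c ∈ cs, c = '0' ∨ c = '1'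

-- characterisation of bval by the split segments
theorem bval_eq_split (cs : List Char) : ∀ k : Nat, only01 cs →
    bval cs k =
      (match pysplit cs with
       | [] => 0
       | s :: rest => if rest = [] then 0
                      else Nat.max (k + s.length) (fmax (rest.dropLast.map List.length))) := by
  induction cs with
  | nil => intro k _; simp [bval, pysplit]
  | cons c t ih =>
      intro k h01
      have ht : only01 t := fun x hx => h01 x (List.mem_cons_of_mem _ hx)
      rcases h01 c (List.mem_cons_self) with h0 | h1
      · -- c = '0'
        subst h0
        cases hps : pysplit t with
        | nil => exact absurd hps (pysplit_ne_nil t)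
        | cons s rest =>
            rw [bval_zero, pysplit_zero t s rest hps, ih (k + 1) ht, hps]
            by_cases hr : rest = []
            · simp [hr]
            · simp only [if_neg hr, List.length_cons]
              congr 1
              omega
      · -- c = '1'
        subst h1
        rw [bval_one, pysplit_one, ih 0 ht]
        cases hps : pysplit t with
        | nil => exact absurd hps (pysplit_ne_nil t)
        | cons s rest =>
            by_cases hr : rest = []
            · subst hr
              simp [List.dropLast, fmax]
            · simp only [if_neg hr, if_neg (show ¬ (s :: rest : List (List Char)) = [] by simp)]
              rw [List.dropLast_cons_of_ne_nil hr, List.map_cons, fmax_cons]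
              simp

-- the two reductions agree on any 0/1 string
theorem scan_eq_split (cs : List Char) (h : only01 cs) :
    (cs.foldl stepA (0, 0)).1 = fmax ((pysplit cs).dropLast.map List.length) := by
  rw [foldlA_eq_bval, bval_eq_split cs 0 h]
  cases hps : pysplit cs with
  | nil => exact absurd hps (pysplit_ne_nil cs)
  | cons s rest =>
      by_cases hr : rest = []
      · subst hr; simp [fmax]
      · simp only [if_neg hr]
        rw [List.dropLast_cons_of_ne_nil hr, List.map_cons, fmax_cons]
        simp

theorem only01_natBin (n : Nat) : only01 (natBin n) := by
  induction n using Nat.strong_induction_on with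
  | _ n ih =>
      match n with
      | 0 => intro c hc; simp [natBin] at hc
      | Nat.succ m =>
          intro c hc
          rw [natBin] at hc
          rcases List.mem_append.1 hc with h | h
          · exact ih ((m + 1) / 2) (Nat.div_lt_self (Nat.succ_pos m) (by omega)) c h
          · simp at h
            split at h <;> simp [h]

theorem natBin_head (n : Nat) (hn : 1 ≤ n) : (natBin n).headD ' ' = '1' := by
  induction n using Nat.strong_induction_on with
  | _ n ih =>
      match n, hn with
      | Nat.succ m, _ =>
          rw [natBin]
          by_cases h2 : (m + 1) / 2 = 0
          · have : m = 0 := by omega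
            subst this
            simp [natBin]
          · have hlt : (m + 1) / 2 < m + 1 := Nat.div_lt_self (Nat.succ_pos m) (by omega)
            have := ih ((m + 1) / 2) hlt (by omega)
            cases hb : natBin ((m + 1) / 2) with
            | nil => simp [hb] at this
            | cons a t => simp [hb] at this ⊢; exact this

-- ===== VERDICT (by name: the statement is the Claim_ definition above) =====
theorem solution_spec : Claim_equal_solution := by
  intro N _ hpre
  obtain ⟨h0, h1⟩ := hpre
  have hg : ¬ (N < 0 ∨ N > 2147483647) := by omega
  unfold Spec_solution solution solution_alt
  rw [if_neg hg, if_neg hg]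
  by_cases hz : N = 0
  · subst hz; decide
  · have hn1 : 1 ≤ N.toNat := by omega
    have hb : binStr N = natBin N.toNat := by simp [binStr, hz]
    have hhd := natBin_head N.toNat hn1
    simp only [hb, hhd, ne_eq, not_true_eq_false, if_false]
    have h := scan_eq_split (natBin N.toNat) (only01_natBin N.toNat)
    simp only [fmax] at h
    exact_mod_cast h
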